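-- pv_equiv track=rewrite | github.com/jayasurya-n/Leetcode | Daily_Problems/2025/July/q29.py | smallestSubarrays
-- ===== SOURCE A (Python) =====
-- from typing import List,Optional
--
-- def smallestSubarrays(nums: List[int]) -> List[int]:
--     # n = len(nums)
--     # ans = [-1]*n
--
--     # def solve_ones_array(val):
--     #     count = [0]*32
--     #     for i in range(32):
--     #         if((val>>i)&1==1):count[i] = 1
--     #     return count
--
--
--     # ones = [0]*32
--     # end = n-1
--     # or_val = 0
--     # for j in range(n-1,-1,-1):
--     #     or_val|=nums[j]
--     #     count = solve_ones_array(nums[j])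
--     #     for i in range(32):
--     #         ones[i]+=count[i]
--
--     #     while end>j:
--     #         count = solve_ones_array(nums[end])
--     #         ok = True
--     #         for i in range(32):
--     #             if(ones[i]>0):
--     #                 ones[i]-=count[i]
--     #                 if(ones[i]<=0):ok = False
--
--     #         if(not ok):
--     #             for i in range(32):
--     #                 ones[i]+=count[i]
--     #             break
--
--     #         end-=1
--
--     #     ans[j] = end-j+1
--
--     # return ans
--
--     n = len(nums)
--     ones = [-1]*32
--     ans = [-1]*n
--
--     for i in range(n-1,-1,-1):
--         end = i
--         for bit in range(32):
--             if(nums[i]>>bit)&1==1:ones[bit] = i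
--             else:
--                 if(ones[bit]!=-1):end = max(end,ones[bit])
--
--         ans[i] = end-i+1
--
--     return ans
-- ===== SOURCE B (Python) =====
-- from typing import List
--
-- def smallestSubarrays(nums: List[int]) -> List[int]:
--     # Two-pointer sliding window over the 32 tracked bits: keep, for the window
--     # [i..end], the count of elements having each bit set; moving i leftwards,
--     # shrink end while dropping nums[end] keeps every currently-present bit
--     # represented in the window.
--     n = len(nums)
--     cnt = [0] * 32
--     ans = [0] * n
--     end = n - 1
--     for i in range(n - 1, -1, -1):
--         for b in range(32):
--             cnt[b] += (nums[i] >> b) & 1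
--         while end > i:
--             can_drop = True
--             for b in range(32):
--                 if cnt[b] > 0 and cnt[b] == (nums[end] >> b) & 1:
--                     can_drop = False
--                     break
--             if not can_drop:
--                 break
--             for b in range(32):
--                 cnt[b] -= (nums[end] >> b) & 1
--             end -= 1
--         ans[i] = end - i + 1
--     return ans
-- ===== Notes on version B (the rewrite author's own statement) =====
-- stated objective: alternative
-- what changed: A keeps, per bit, the nearest index to the right where that bit is set and takes a max over bits at each position; B instead maintains a two-pointer sliding window with live per-bit occurrence counts and a shrink step that drops the right end while every bit present in the window remains represented.
import Mathlib
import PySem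

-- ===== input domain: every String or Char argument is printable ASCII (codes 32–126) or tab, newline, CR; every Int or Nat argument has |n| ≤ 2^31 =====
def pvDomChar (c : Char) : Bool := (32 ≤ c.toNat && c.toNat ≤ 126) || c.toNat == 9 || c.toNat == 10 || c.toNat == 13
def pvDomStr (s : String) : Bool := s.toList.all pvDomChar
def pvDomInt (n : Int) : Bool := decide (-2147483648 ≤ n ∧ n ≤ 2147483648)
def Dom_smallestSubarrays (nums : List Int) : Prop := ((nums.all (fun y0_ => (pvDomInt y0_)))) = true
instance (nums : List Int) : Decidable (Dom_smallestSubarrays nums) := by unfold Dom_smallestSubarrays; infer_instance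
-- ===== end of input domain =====

-- B replaces A's per-index last-seen-bit bookkeeping with a two-pointer sliding window
-- over per-bit occurrence counts (objective: alternative; equivalence of return values proved below).

-- ===== PORT A =====
-- A: right-to-left scan keeping, per bit, the nearest index ≥ i having that bit set.
def smallestSubarrays (nums : List Int) : List Int :=
  let n : Int := PySem.List.len nums
  let ones : List Int := PySem.List.pyRepeat [(-1 : Int)] 32
  let ans : List Int := PySem.List.pyRepeat [(-1 : Int)] n
  let r := (PySem.List.pyRange (n - 1) (-1) (-1)).foldl (fun (st : List Int × List Int) i =>
      -- end = i; for bit in range(32): …    (bit ≥ 0, so `bit.toNat` is Python's `>> bit` exactly)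
      let inner := (PySem.List.pyRange 0 32 1).foldl (fun (p : List Int × Int) bit =>
          if PySem.Int.band (PySem.List.pyGetD nums i 0 >>> bit.toNat) 1 = 1 then
            (PySem.List.pySetD p.1 bit i, p.2)
          else if PySem.List.pyGetD p.1 bit 0 ≠ -1 then
            (p.1, max p.2 (PySem.List.pyGetD p.1 bit 0))
          else p)
        (st.1, i)
      (inner.1, PySem.List.pySetD st.2 i (inner.2 - i + 1)))
    (ones, ans)
  r.2

-- ===== PORT B =====
-- B helper: the `while end > i: …` loop; fuel (end-i).toNat bounds the iterations exactly
-- (each pass decrements end by 1 and the loop stops at end = i), so the port is exact.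
def pvShrink (nums : List Int) (i : Int) : Nat → List Int × Int → List Int × Int
  | 0, st => st
  | fuel + 1, (cnt, e) =>
    if e > i then
      let canDrop := !((PySem.List.pyRange 0 32 1).any (fun b =>
        decide (0 < PySem.List.pyGetD cnt b 0 ∧
          PySem.List.pyGetD cnt b 0 = PySem.Int.band (PySem.List.pyGetD nums e 0 >>> b.toNat) 1)))
      if canDrop then
        pvShrink nums i fuel
          ((PySem.List.pyRange 0 32 1).foldl (fun c b =>
              PySem.List.pySetD c b (PySem.List.pyGetD c b 0 -
                PySem.Int.band (PySem.List.pyGetD nums e 0 >>> b.toNat) 1)) cnt,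
           e - 1)
      else (cnt, e)
    else (cnt, e)

def smallestSubarrays_alt (nums : List Int) : List Int :=
  let n : Int := PySem.List.len nums
  let r := (PySem.List.pyRange (n - 1) (-1) (-1)).foldl (fun (st : List Int × List Int × Int) i =>
      let cnt1 := (PySem.List.pyRange 0 32 1).foldl (fun c b =>
          PySem.List.pySetD c b (PySem.List.pyGetD c b 0 +
            PySem.Int.band (PySem.List.pyGetD nums i 0 >>> b.toNat) 1)) st.1
      let s2 := pvShrink nums i (st.2.2 - i).toNat (cnt1, st.2.2)
      (s2.1, PySem.List.pySetD st.2.1 i (s2.2 - i + 1), s2.2))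
    (PySem.List.pyRepeat [(0 : Int)] 32, PySem.List.pyRepeat [(0 : Int)] n, n - 1)
  r.2.1

-- ===== PRECONDITION & SPEC =====
def Spec_smallestSubarrays (nums : List Int) (out : List Int) : Prop := out = smallestSubarrays_alt nums
instance (nums : List Int) (out : List Int) : Decidable (Spec_smallestSubarrays nums out) := by unfold Spec_smallestSubarrays; infer_instance

-- ===== CLAIM (what is proved, stated in full; the proofs are below) =====
def Claim_equal_smallestSubarrays : Prop := ∀ (nums : List Int), Dom_smallestSubarrays nums → Spec_smallestSubarrays nums (smallestSubarrays nums)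

-- ===== LEMMAS AND PROOFS =====

-- bit b of x (0 or 1), as both programs read it
def pvBit (x : Int) (b : Nat) : Int := PySem.Int.band (x >>> b) 1

-- first index k ≥ i with bit b set in nums[k], else -1
def pvFI (nums : List Int) (b : Nat) (i : Nat) : Int :=
  if h : i < nums.length then
    if pvBit nums[i] b = 1 then (i : Int) else pvFI nums b (i + 1)
  else -1
termination_by nums.length - i

-- right end of the minimal window starting at i covering all 32 tracked bits of the suffix
def pvEnd (nums : List Int) (i : Nat) : Int :=
  (List.range 32).foldl (fun e b => max e (pvFI nums b i)) (i : Int)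

-- number of k in [i, i+m) with bit b set
def pvCnt (nums : List Int) (i m b : Nat) : Nat :=
  (List.range' i m).countP (fun k => pvBit (nums.getD k 0) b == 1)

-- the common value of both programs
def pvSpecL (nums : List Int) : List Int :=
  (List.range nums.length).map (fun j => pvEnd nums j - (j : Int) + 1)


lemma pvBit01 (x : Int) (b : Nat) : pvBit x b = 0 ∨ pvBit x b = 1 := by
  have h0 := PySem.Int.mod_nonneg (x >>> b) (b := 2) (by norm_num)
  have h1 := PySem.Int.mod_lt (x >>> b) (b := 2) (by norm_num)
  unfold pvBit
  rw [PySem.Int.band_one]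
  omega

lemma pvBit_zero (b : Nat) : pvBit 0 b = 0 := by
  unfold pvBit
  rw [Int.zero_shiftRight]
  rw [PySem.Int.band_one]
  decide

lemma pvFI_out {nums : List Int} {b i : Nat} (h : nums.length ≤ i) : pvFI nums b i = -1 := by
  rw [pvFI]
  simp [Nat.not_lt.2 h]

lemma pvFI_in {nums : List Int} {b i : Nat} (h : i < nums.length) :
    pvFI nums b i = if pvBit nums[i] b = 1 then (i : Int) else pvFI nums b (i + 1) := by
  rw [pvFI]
  simp [h]

lemma pvFI_char (nums : List Int) (b : Nat) : ∀ (d i : Nat), nums.length - i ≤ d →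
    (pvFI nums b i = -1 ∧ ∀ k, i ≤ k → pvBit (nums.getD k 0) b ≠ 1) ∨
    (∃ v : Nat, pvFI nums b i = (v : Int) ∧ i ≤ v ∧ v < nums.length ∧
      pvBit (nums.getD v 0) b = 1 ∧ ∀ k, i ≤ k → k < v → pvBit (nums.getD k 0) b ≠ 1) := by
  intro d
  induction d with
  | zero =>
    intro i hd
    left
    have hle : nums.length ≤ i := by omega
    refine ⟨pvFI_out hle, fun k hk => ?_⟩
    have : nums.length ≤ k := by omega
    rw [List.getD_eq_default _ _ this, pvBit_zero]
    decide
  | succ d ih =>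
    intro i hd
    by_cases hi : i < nums.length
    · by_cases hb : pvBit nums[i] b = 1
      · right
        exact ⟨i, by rw [pvFI_in hi, if_pos hb], le_refl i, hi,
          by rwa [List.getD_eq_getElem _ _ hi], fun k h1 h2 => absurd h1 (by omega)⟩
      · have hrec : pvFI nums b i = pvFI nums b (i + 1) := by rw [pvFI_in hi, if_neg hb]
        have hbd : pvBit (nums.getD i 0) b ≠ 1 := by rwa [List.getD_eq_getElem _ _ hi]
        rcases ih (i + 1) (by omega) with ⟨h1, h2⟩ | ⟨v, h1, h2, h3, h4, h5⟩
        · left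
          refine ⟨by rw [hrec, h1], fun k hk => ?_⟩
          rcases Nat.eq_or_lt_of_le hk with rfl | hk'
          · exact hbd
          · exact h2 k hk'
        · right
          refine ⟨v, by rw [hrec, h1], by omega, h3, h4, fun k hk1 hk2 => ?_⟩
          rcases Nat.eq_or_lt_of_le hk1 with rfl | hk'
          · exact hbd
          · exact h5 k hk' hk2
    · left
      have hle : nums.length ≤ i := by omega
      refine ⟨pvFI_out hle, fun k hk => ?_⟩
      have : nums.length ≤ k := by omega
      rw [List.getD_eq_default _ _ this, pvBit_zero]
      decide

lemma pvFI_lt_length (nums : List Int) (b i : Nat) : pvFI nums b i < (nums.length : Int) := by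
  rcases pvFI_char nums b (nums.length - i) i (le_refl _) with ⟨h, _⟩ | ⟨v, h, _, h3, _⟩
  · rw [h]
    have : (0 : Int) ≤ nums.length := by positivity
    omega
  · rw [h]; exact_mod_cast h3

-- generic foldl-max facts used to read off pvEnd
lemma foldl_max_le_iff (l : List Nat) (f : Nat → Int) (a j : Int) :
    l.foldl (fun e b => max e (f b)) a ≤ j ↔ a ≤ j ∧ ∀ x ∈ l, f x ≤ j := by
  induction l generalizing a with
  | nil => simp
  | cons hd tl ih => simp [ih, and_assoc]

lemma foldl_max_cases (l : List Nat) (f : Nat → Int) (a : Int) :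
    l.foldl (fun e b => max e (f b)) a = a ∨
    ∃ x ∈ l, l.foldl (fun e b => max e (f b)) a = f x := by
  induction l generalizing a with
  | nil => simp
  | cons hd tl ih =>
    rcases ih (max a (f hd)) with h | ⟨x, hx, h⟩
    · simp only [List.foldl_cons] at *
      rcases max_cases a (f hd) with ⟨he, _⟩ | ⟨he, _⟩
      · left; rw [h, he]
      · right; exact ⟨hd, List.mem_cons_self, by rw [h, he]⟩
    · right
      exact ⟨x, List.mem_cons_of_mem _ hx, h⟩

lemma le_pvEnd (nums : List Int) (i : Nat) : (i : Int) ≤ pvEnd nums i :=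
  (PySem.List.le_foldl_max_int _ _ _).1

lemma pvFI_le_pvEnd (nums : List Int) {b : Nat} (i : Nat) (hb : b < 32) :
    pvFI nums b i ≤ pvEnd nums i :=
  (PySem.List.le_foldl_max_int _ _ _).2 b (List.mem_range.2 hb)

lemma pvEnd_le_iff (nums : List Int) (i : Nat) (j : Int) :
    pvEnd nums i ≤ j ↔ (i : Int) ≤ j ∧ ∀ b, b < 32 → pvFI nums b i ≤ j := by
  unfold pvEnd
  rw [foldl_max_le_iff]
  simp [List.mem_range]

lemma pvEnd_lt_length (nums : List Int) {i : Nat} (h : i < nums.length) :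
    pvEnd nums i < (nums.length : Int) := by
  have : pvEnd nums i ≤ (nums.length : Int) - 1 := by
    rw [pvEnd_le_iff]
    constructor
    · omega
    · intro b _
      have := pvFI_lt_length nums b i
      omega
  omega

lemma pvEnd_mono (nums : List Int) (i : Nat) : pvEnd nums i ≤ pvEnd nums (i + 1) := by
  rw [pvEnd_le_iff]
  have h1 := le_pvEnd nums (i + 1)
  refine ⟨by omega, fun b hb => ?_⟩
  by_cases hi : i < nums.length
  · rw [pvFI_in hi]
    split
    · omega
    · exact pvFI_le_pvEnd nums (i + 1) hb
  · rw [pvFI_out (by omega)]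
    omega

lemma pvEnd_attained (nums : List Int) {i : Nat} (h : (i : Int) < pvEnd nums i) :
    ∃ b, b < 32 ∧ pvFI nums b i = pvEnd nums i := by
  unfold pvEnd at h ⊢
  rcases foldl_max_cases (List.range 32) (fun b => pvFI nums b i) (i : Int) with hc | ⟨b, hb, hc⟩
  · omega
  · exact ⟨b, List.mem_range.1 hb, hc.symm⟩

-- window-count facts
lemma pvCnt_zero (nums : List Int) (i b : Nat) : pvCnt nums i 0 b = 0 := rfl

lemma pvCnt_succ (nums : List Int) (i m b : Nat) :
    pvCnt nums i (m + 1) b =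
      pvCnt nums i m b + (if pvBit (nums.getD (i + m) 0) b = 1 then 1 else 0) := by
  unfold pvCnt
  rw [List.range'_concat, List.countP_append]
  simp [List.countP_cons]

lemma pvCnt_cons (nums : List Int) (i m b : Nat) :
    pvCnt nums i (m + 1) b =
      (if pvBit (nums.getD i 0) b = 1 then 1 else 0) + pvCnt nums (i + 1) m b := by
  unfold pvCnt
  rw [List.range'_succ, List.countP_cons]
  split
  · rename_i hyes
    simp only [beq_iff_eq] at *
    rw [if_pos hyes]
    omega
  · rename_i hno
    simp only [beq_iff_eq] at *
    rw [if_neg hno]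
    omega

lemma pvCnt_pos_iff (nums : List Int) (i m b : Nat) :
    0 < pvCnt nums i m b ↔ ∃ k, i ≤ k ∧ k < i + m ∧ pvBit (nums.getD k 0) b = 1 := by
  unfold pvCnt
  rw [List.countP_pos_iff]
  constructor
  · rintro ⟨k, hk, hp⟩
    rw [List.mem_range'_1] at hk
    exact ⟨k, hk.1, hk.2, by simpa using hp⟩
  · rintro ⟨k, h1, h2, h3⟩
    exact ⟨k, List.mem_range'_1.2 ⟨h1, h2⟩, by simpa using h3⟩


-- one pass `for b in range(32): xs[b] = f b xs[b]`, entrywise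
lemma setFold (f : Nat → Int → Int) : ∀ (m c : Nat) (xs : List Int), xs.length = 32 → c + m ≤ 32 →
    (((List.range' c m).foldl (fun cc b => cc.set b (f b (cc.getD b 0))) xs).length = 32 ∧
     ∀ b : Nat, ((List.range' c m).foldl (fun cc b => cc.set b (f b (cc.getD b 0))) xs).getD b 0 =
       if c ≤ b ∧ b < c + m then f b (xs.getD b 0) else xs.getD b 0) := by
  intro m
  induction m with
  | zero =>
    intro c xs hlen _
    refine ⟨by simpa using hlen, fun b => ?_⟩
    simp only [List.range'_zero, List.foldl_nil]
    split
    · omega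
    · rfl
  | succ m ih =>
    intro c xs hlen hcm
    rw [List.range'_succ]
    simp only [List.foldl_cons]
    have hlen' : (xs.set c (f c (xs.getD c 0))).length = 32 := by simpa using hlen
    obtain ⟨ihl, ihe⟩ := ih (c + 1) (xs.set c (f c (xs.getD c 0))) hlen' (by omega)
    refine ⟨ihl, fun b => ?_⟩
    rw [ihe b]
    have hset : ∀ b : Nat, (xs.set c (f c (xs.getD c 0))).getD b 0 =
        if b = c then f c (xs.getD c 0) else xs.getD b 0 := by
      intro b
      simp only [List.getD, List.getElem?_set, hlen]
      split
      · rename_i h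
        rw [if_pos h.symm, if_pos (by omega)]
        rfl
      · rename_i h
        rw [if_neg (fun hh => h hh.symm)]
    rw [hset b]
    rcases Nat.lt_trichotomy b c with h | h | h
    · rw [if_neg (by omega), if_neg (by omega), if_neg (by omega)]
    · subst h
      rw [if_neg (by omega), if_pos rfl, if_pos (by omega)]
    · by_cases h2 : b < c + (m + 1)
      · rw [if_pos (by omega), if_neg (by omega), if_pos (by omega)]
      · rw [if_neg (by omega), if_neg (by omega), if_neg (by omega)]

-- A's inner `for bit in range(32)` loop, against pvFI / pvEnd
lemma innerA (nums : List Int) (iN : Nat) (hi : iN < nums.length) :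
    ∀ (m c : Nat), c + m = 32 → ∀ (ones : List Int) (e : Int), ones.length = 32 → (iN : Int) ≤ e →
    (∀ b : Nat, c ≤ b → b < 32 → ones.getD b 0 = pvFI nums b (iN + 1)) →
    (∀ b : Nat, b < c → ones.getD b 0 = pvFI nums b iN) →
    (((List.range' c m).foldl
        (fun (p : List Int × Int) (b : Nat) =>
          if pvBit nums[iN] b = 1 then (p.1.set b ((iN : Nat) : Int), p.2)
          else if p.1.getD b 0 ≠ -1 then (p.1, max p.2 (p.1.getD b 0)) else p)
        (ones, e)).1.length = 32 ∧
     (∀ b : Nat, ((List.range' c m).foldl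
        (fun (p : List Int × Int) (b : Nat) =>
          if pvBit nums[iN] b = 1 then (p.1.set b ((iN : Nat) : Int), p.2)
          else if p.1.getD b 0 ≠ -1 then (p.1, max p.2 (p.1.getD b 0)) else p)
        (ones, e)).1.getD b 0 = if b < c + m then pvFI nums b iN else ones.getD b 0) ∧
     ((List.range' c m).foldl
        (fun (p : List Int × Int) (b : Nat) =>
          if pvBit nums[iN] b = 1 then (p.1.set b ((iN : Nat) : Int), p.2)
          else if p.1.getD b 0 ≠ -1 then (p.1, max p.2 (p.1.getD b 0)) else p)
        (ones, e)).2 = (List.range' c m).foldl (fun e' b => max e' (pvFI nums b iN)) e) := by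
  intro m
  induction m with
  | zero =>
    intro c hcm ones e hlen he h1 h2
    simp only [List.range'_zero, List.foldl_nil]
    refine ⟨hlen, fun b => ?_, trivial⟩
    by_cases hb : b < c + 0
    · rw [if_pos hb]
      exact h2 b (by omega)
    · rw [if_neg hb]
  | succ m ih =>
    intro c hcm ones e hlen he h1 h2
    rw [List.range'_succ]
    simp only [List.foldl_cons]
    have hc32 : c < 32 := by omega
    have hstep : (if pvBit nums[iN] c = 1 then (ones.set c ((iN : Nat) : Int), e)
          else if ones.getD c 0 ≠ -1 then (ones, max e (ones.getD c 0)) else (ones, e))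
        = (if pvBit nums[iN] c = 1 then ones.set c ((iN : Nat) : Int) else ones,
           max e (pvFI nums c iN)) := by
      have hofi : ones.getD c 0 = pvFI nums c (iN + 1) := h1 c (le_refl c) hc32
      rw [pvFI_in hi]
      by_cases hb : pvBit nums[iN] c = 1
      · rw [if_pos hb, if_pos hb, if_pos hb, max_eq_left (by exact_mod_cast he)]
      · rw [if_neg hb, if_neg hb, if_neg hb, hofi]
        by_cases hm : pvFI nums c (iN + 1) = -1
        · rw [if_neg (by simpa using hm), hm, max_eq_left (by omega)]
        · rw [if_pos (by simpa using hm)]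
    have hset : ∀ b : Nat,
        (if pvBit nums[iN] c = 1 then ones.set c ((iN : Nat) : Int) else ones).getD b 0 =
        if b = c then pvFI nums c iN else ones.getD b 0 := by
      intro b
      by_cases hb : pvBit nums[iN] c = 1
      · rw [if_pos hb]
        by_cases hbc : b = c
        · subst hbc
          rw [if_pos rfl, pvFI_in hi, if_pos hb]
          simp [List.getD, hlen, hc32]
        · rw [if_neg hbc]
          simp [List.getD, (show ¬(c = b) from fun h => hbc h.symm)]
      · rw [if_neg hb]
        by_cases hbc : b = c
        · subst hbc
          rw [if_pos rfl, pvFI_in hi, if_neg hb]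
          exact h1 b (le_refl b) hc32
        · rw [if_neg hbc]
    have hlen2 : (if pvBit nums[iN] c = 1 then ones.set c ((iN : Nat) : Int) else ones).length = 32 := by
      split <;> simpa using hlen
    have he2 : (iN : Int) ≤ max e (pvFI nums c iN) := le_trans he (le_max_left _ _)
    obtain ⟨jl, je, jv⟩ := ih (c + 1) (by omega) _ (max e (pvFI nums c iN)) hlen2 he2
      (fun b hb hb32 => by rw [hset b, if_neg (by omega)]; exact h1 b (by omega) hb32)
      (fun b hb => by
        rw [hset b]
        by_cases hbc : b = c
        · subst hbc
          rw [if_pos rfl]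
        · rw [if_neg hbc]
          exact h2 b (by omega))
    rw [hstep]
    refine ⟨jl, fun b => ?_, jv⟩
    rw [je b]
    by_cases hb2 : b < c + 1 + m
    · rw [if_pos hb2, if_pos (by omega)]
    · rw [if_neg hb2, hset b, if_neg (show ¬ b = c by omega),
        if_neg (show ¬ b < c + (m + 1) by omega)]


lemma getD_set_ite (xs : List Int) (c b : Nat) (v : Int) (hc : c < xs.length) :
    (xs.set c v).getD b 0 = if b = c then v else xs.getD b 0 := by
  by_cases hbc : b = c
  · subst hbc
    rw [if_pos rfl]
    simp [List.getD, hc]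
  · rw [if_neg hbc]
    simp [List.getD, (show ¬(c = b) from fun h => hbc h.symm)]

lemma pyRange32 : PySem.List.pyRange 0 32 1 = (List.range' 0 32).map (fun b : Nat => (b : Int)) := by
  rw [← List.range_eq_range', ← PySem.List.pyRange_zero_nat 32]
  norm_num

-- A as a fold of its step function
def stepA (nums : List Int) (st : List Int × List Int) (i : Int) : List Int × List Int :=
  let inner := (PySem.List.pyRange 0 32 1).foldl (fun (p : List Int × Int) bit =>
      if PySem.Int.band (PySem.List.pyGetD nums i 0 >>> bit.toNat) 1 = 1 then
        (PySem.List.pySetD p.1 bit i, p.2)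
      else if PySem.List.pyGetD p.1 bit 0 ≠ -1 then
        (p.1, max p.2 (PySem.List.pyGetD p.1 bit 0))
      else p)
    (st.1, i)
  (inner.1, PySem.List.pySetD st.2 i (inner.2 - i + 1))

lemma A_unfold (nums : List Int) : smallestSubarrays nums =
    ((PySem.List.pyRange ((nums.length : Int) - 1) (-1) (-1)).foldl (stepA nums)
      (List.replicate 32 (-1), List.replicate nums.length (-1))).2 := by
  simp only [smallestSubarrays, PySem.List.len_eq, PySem.List.pyRepeat_singleton,
    Int.toNat_natCast]
  rfl

-- A's step at a concrete in-range index, against the invariant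
lemma stepA_spec (nums : List Int) (iN : Nat) (hi : iN < nums.length)
    (ones ans : List Int) (hol : ones.length = 32) (_hal : ans.length = nums.length)
    (h1 : ∀ b : Nat, b < 32 → ones.getD b 0 = pvFI nums b (iN + 1)) :
    (stepA nums (ones, ans) ((iN : Nat) : Int)).2 = ans.set iN (pvEnd nums iN - (iN : Int) + 1) ∧
    (stepA nums (ones, ans) ((iN : Nat) : Int)).1.length = 32 ∧
    (∀ b : Nat, b < 32 → (stepA nums (ones, ans) ((iN : Nat) : Int)).1.getD b 0 = pvFI nums b iN) := by
  have hnum : nums.getD iN 0 = nums[iN] := List.getD_eq_getElem _ _ hi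
  have hbit : ∀ (x : Int) (b : Nat), PySem.Int.band (x >>> b) 1 = pvBit x b := fun _ _ => rfl
  obtain ⟨l1, l2, l3⟩ := innerA nums iN hi 32 0 rfl ones ((iN : Nat) : Int) hol (le_refl _)
    (fun b _ hb => h1 b hb) (fun b hb => absurd hb (by omega))
  simp only [stepA, pyRange32, List.foldl_map, Int.toNat_natCast, Int.shiftRight_natCast_right,
    PySem.List.pyGetD_natCast, PySem.List.pySetD_natCast, hnum, hbit]
  simp only [Nat.zero_add] at l1 l2 l3
  refine ⟨?_, l1, fun b hb => by rw [l2 b, if_pos (by omega)]⟩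
  simp only [l3]
  have hpe : (List.range' 0 32).foldl (fun e' b => max e' (pvFI nums b iN)) ((iN : Nat) : Int)
      = pvEnd nums iN := by
    rw [pvEnd, List.range_eq_range']
  rw [hpe]


lemma A_outer (nums : List Int) : ∀ (m k : Nat), k + m = nums.length →
    ∀ (ones ans : List Int), ones.length = 32 → ans.length = nums.length →
    (∀ b : Nat, b < 32 → ones.getD b 0 = pvFI nums b (nums.length - k)) →
    (∀ j : Nat, nums.length - k ≤ j → j < nums.length →
      ans.getD j 0 = pvEnd nums j - (j : Int) + 1) →
    (((List.range' k m).foldl (fun st (t : Nat) => stepA nums st ((nums.length : Int) - 1 - (t : Int)))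
        (ones, ans)).2.length = nums.length ∧
     ∀ j : Nat, j < nums.length →
      ((List.range' k m).foldl (fun st (t : Nat) => stepA nums st ((nums.length : Int) - 1 - (t : Int)))
        (ones, ans)).2.getD j 0 = pvEnd nums j - (j : Int) + 1) := by
  intro m
  induction m with
  | zero =>
    intro k hk ones ans hol hal h1 h2
    simp only [List.range'_zero, List.foldl_nil]
    exact ⟨hal, fun j hj => h2 j (by omega) hj⟩
  | succ m ih =>
    intro k hk ones ans hol hal h1 h2
    rw [List.range'_succ]
    simp only [List.foldl_cons]
    have hkn : k < nums.length := by omega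
    set iN : Nat := nums.length - 1 - k with hiN
    have hi : iN < nums.length := by omega
    have hcast : (nums.length : Int) - 1 - (k : Int) = ((iN : Nat) : Int) := by
      rw [hiN]; omega
    rw [hcast]
    obtain ⟨s2, s1, sentry⟩ := stepA_spec nums iN hi ones ans hol hal
      (fun b hb => by rw [h1 b hb, show nums.length - k = iN + 1 by omega])
    obtain ⟨jl, je⟩ := ih (k + 1) (by omega) (stepA nums (ones, ans) ((iN : Nat) : Int)).1
      (stepA nums (ones, ans) ((iN : Nat) : Int)).2
      s1 (by rw [s2]; simpa using hal)
      (fun b hb => by rw [sentry b hb, show nums.length - (k + 1) = iN by omega])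
      (fun j hj1 hj2 => by
        rw [s2, getD_set_ite _ _ _ _ (by omega)]
        by_cases hji : j = iN
        · rw [if_pos hji, hji]
        · rw [if_neg hji]
          exact h2 j (by omega) hj2)
    constructor
    · exact jl
    · intro j hj
      exact je j hj

lemma A_eq_spec (nums : List Int) : smallestSubarrays nums = pvSpecL nums := by
  rw [A_unfold]
  have hrange : PySem.List.pyRange ((nums.length : Int) - 1) (-1) (-1) =
      (List.range' 0 nums.length).map (fun t : Nat => (nums.length : Int) - 1 - (t : Int)) := by
    rw [PySem.List.pyRange_neg_one, ← List.range_eq_range',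
      show ((nums.length : Int) - 1 - (-1)) = ((nums.length : Nat) : Int) by ring,
      Int.toNat_natCast]
  rw [hrange, List.foldl_map]
  obtain ⟨hl, he⟩ := A_outer nums nums.length 0 (by omega)
    (List.replicate 32 (-1)) (List.replicate nums.length (-1)) (by simp) (by simp)
    (fun b hb => by
      rw [List.getD_replicate _ hb, Nat.sub_zero, pvFI_out (le_refl _)])
    (fun j hj1 hj2 => by omega)
  apply List.ext_getElem
  · rw [hl]
    simp [pvSpecL]
  · intro j h1 h2
    have hj : j < nums.length := by
      simpa [pvSpecL] using h2
    rw [← List.getD_eq_getElem _ 0 h1, he j hj]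
    simp [pvSpecL]


-- B's `while` loop against pvEnd / pvCnt
lemma shrink_spec (nums : List Int) : ∀ (fuel : Nat), ∀ (eN iN : Nat), ∀ (cnt : List Int),
    iN < nums.length → eN < nums.length → iN ≤ eN → cnt.length = 32 →
    (∀ b : Nat, b < 32 → cnt.getD b 0 = (pvCnt nums iN (eN + 1 - iN) b : Int)) →
    pvEnd nums iN ≤ (eN : Int) → (eN : Int) - pvEnd nums iN ≤ (fuel : Int) →
    ((pvShrink nums ((iN : Nat) : Int) fuel (cnt, ((eN : Nat) : Int))).2 = pvEnd nums iN ∧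
     (pvShrink nums ((iN : Nat) : Int) fuel (cnt, ((eN : Nat) : Int))).1.length = 32 ∧
     ∀ b : Nat, b < 32 → (pvShrink nums ((iN : Nat) : Int) fuel (cnt, ((eN : Nat) : Int))).1.getD b 0 =
       (pvCnt nums iN ((pvEnd nums iN).toNat + 1 - iN) b : Int)) := by
  intro fuel
  induction fuel with
  | zero =>
    intro eN iN cnt hi he hie hcl hcnt hub hfu
    have heq : pvEnd nums iN = (eN : Int) := by omega
    simp only [pvShrink]
    rw [heq, Int.toNat_natCast]
    exact ⟨rfl, hcl, fun b hb => hcnt b hb⟩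
  | succ fuel ih =>
    intro eN iN cnt hi he hie hcl hcnt hub hfu
    rcases Nat.eq_or_lt_of_le hie with rfl | hlt
    · have heq : pvEnd nums iN = (iN : Int) := le_antisymm hub (le_pvEnd nums iN)
      simp only [pvShrink]
      rw [if_neg (by omega), heq, Int.toNat_natCast]
      exact ⟨rfl, hcl, fun b hb => hcnt b hb⟩
    · have hiN := le_pvEnd nums iN
      have hnum : nums.getD eN 0 = nums[eN] := List.getD_eq_getElem _ _ he
      have hbit : ∀ (x : Int) (b : Nat), PySem.Int.band (x >>> b) 1 = pvBit x b := fun _ _ => rfl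
      have hkey : ((List.range' 0 32).any (fun b =>
          decide (0 < cnt.getD b 0 ∧ cnt.getD b 0 = pvBit nums[eN] b))) = true ↔
          pvEnd nums iN = (eN : Int) := by
        rw [List.any_eq_true]
        constructor
        · rintro ⟨b, hbm, hbp⟩
          rw [List.mem_range'_1] at hbm
          rw [decide_eq_true_iff] at hbp
          obtain ⟨hpos, hval⟩ := hbp
          have hcb := hcnt b (by omega)
          have hcpos : 0 < pvCnt nums iN (eN + 1 - iN) b := by omega
          rw [pvCnt_pos_iff] at hcpos
          obtain ⟨k, hk1, hk2, hk3⟩ := hcpos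
          rcases pvFI_char nums b (nums.length - iN) iN (le_refl _) with
            ⟨h1, h2⟩ | ⟨v, h1, h2, h3, h4, h5⟩
          · exact absurd hk3 (h2 k hk1)
          · have hvk : v ≤ k := by
              by_contra hc
              exact (h5 k hk1 (by omega)) hk3
            have hb1 : pvBit nums[eN] b = 1 := by
              rcases pvBit01 nums[eN] b with h0 | h0
              · omega
              · exact h0
            have hveN : v = eN := by
              by_contra hc
              have hsplit : pvCnt nums iN ((eN - iN) + 1) b = pvCnt nums iN (eN - iN) b + 1 := by
                rw [pvCnt_succ, show iN + (eN - iN) = eN by omega, hnum, if_pos hb1]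
              have hpos2 : 0 < pvCnt nums iN (eN - iN) b := by
                rw [pvCnt_pos_iff]
                refine ⟨v, h2, by omega, h4⟩
              have heq2 : eN + 1 - iN = (eN - iN) + 1 := by omega
              rw [heq2, hsplit] at hcb
              omega
            have hfi : pvFI nums b iN = (eN : Int) := by rw [h1, hveN]
            have := pvFI_le_pvEnd nums iN (show b < 32 by omega)
            omega
        · intro hEnd
          obtain ⟨b, hb32, hfi⟩ := pvEnd_attained nums (show ((iN : Nat) : Int) < pvEnd nums iN by omega)
          rw [hEnd] at hfi
          refine ⟨b, List.mem_range'_1.2 ⟨by omega, by omega⟩, ?_⟩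
          rw [decide_eq_true_iff]
          rcases pvFI_char nums b (nums.length - iN) iN (le_refl _) with
            ⟨h1, _⟩ | ⟨v, h1, h2, h3, h4, h5⟩
          · rw [h1] at hfi
            omega
          · have hveN : v = eN := by
              rw [h1] at hfi
              exact_mod_cast hfi
            rw [hveN] at h2 h4 h5
            have hzero : pvCnt nums iN (eN - iN) b = 0 := by
              by_contra hc
              have : 0 < pvCnt nums iN (eN - iN) b := by omega
              rw [pvCnt_pos_iff] at this
              obtain ⟨k, hk1, hk2, hk3⟩ := this
              exact (h5 k hk1 (by omega)) hk3
            have hsplit : pvCnt nums iN ((eN - iN) + 1) b = pvCnt nums iN (eN - iN) b + 1 := by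
              rw [pvCnt_succ, show iN + (eN - iN) = eN by omega, hnum]
              rw [if_pos (by rwa [hnum] at h4)]
            have hcb := hcnt b hb32
            have heq2 : eN + 1 - iN = (eN - iN) + 1 := by omega
            rw [heq2, hsplit, hzero] at hcb
            constructor
            · omega
            · rw [hcb]
              have h4' : pvBit nums[eN] b = 1 := by rwa [hnum] at h4
              rw [h4']
              norm_num
      have hanyrw : ((PySem.List.pyRange 0 32 1).any (fun b =>
          decide (0 < PySem.List.pyGetD cnt b 0 ∧
            PySem.List.pyGetD cnt b 0 =
              PySem.Int.band (PySem.List.pyGetD nums ((eN : Nat) : Int) 0 >>> b.toNat) 1))) =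
          ((List.range' 0 32).any (fun b =>
          decide (0 < cnt.getD b 0 ∧ cnt.getD b 0 = pvBit nums[eN] b))) := by
        rw [pyRange32, List.any_map]
        simp only [Function.comp_def, Int.toNat_natCast, PySem.List.pyGetD_natCast, hnum, hbit]
      by_cases hEnd : pvEnd nums iN = (eN : Int)
      · have hX : ((List.range' 0 32).any (fun b =>
            decide (0 < cnt.getD b 0 ∧ cnt.getD b 0 = pvBit nums[eN] b))) = true := hkey.2 hEnd
        have hstep : pvShrink nums ((iN : Nat) : Int) (fuel + 1) (cnt, ((eN : Nat) : Int)) =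
            (cnt, ((eN : Nat) : Int)) := by
          simp only [pvShrink]
          rw [if_pos (show ((iN : Nat) : Int) < ((eN : Nat) : Int) by omega), hanyrw, hX]
          simp only [Bool.not_true]
          rw [if_neg (by decide)]
        rw [hstep, hEnd, Int.toNat_natCast]
        exact ⟨rfl, hcl, fun b hb => hcnt b hb⟩
      · have hX : ((List.range' 0 32).any (fun b =>
            decide (0 < cnt.getD b 0 ∧ cnt.getD b 0 = pvBit nums[eN] b))) = false := by
          rw [← Bool.not_eq_true]
          exact fun h => hEnd (hkey.1 h)
        have hsub := setFold (fun b v => v - pvBit nums[eN] b) 32 0 cnt hcl (by omega)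
        simp only [Nat.zero_add] at hsub
        have hstep : pvShrink nums ((iN : Nat) : Int) (fuel + 1) (cnt, ((eN : Nat) : Int)) =
            pvShrink nums ((iN : Nat) : Int) fuel
              (((List.range' 0 32).foldl
                  (fun cc b => cc.set b (cc.getD b 0 - pvBit nums[eN] b)) cnt),
               (((eN - 1 : Nat) : Nat) : Int)) := by
          simp only [pvShrink]
          rw [if_pos (show ((iN : Nat) : Int) < ((eN : Nat) : Int) by omega), hanyrw, hX]
          simp only [Bool.not_false]
          rw [if_pos trivial]
          rw [pyRange32, List.foldl_map]
          simp only [Int.toNat_natCast, PySem.List.pyGetD_natCast, PySem.List.pySetD_natCast,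
            hnum, hbit]
          rw [show ((eN : Nat) : Int) - 1 = (((eN - 1 : Nat) : Nat) : Int) by omega]
        rw [hstep]
        have hrec := ih (eN - 1) iN
          ((List.range' 0 32).foldl
            (fun cc b => cc.set b (cc.getD b 0 - pvBit nums[eN] b)) cnt)
          hi (by omega) (by omega) hsub.1
          (fun b hb => by
            rw [hsub.2 b, if_pos (by omega)]
            have hcb := hcnt b hb
            have heq2 : eN + 1 - iN = (eN - iN) + 1 := by omega
            have hsplit := pvCnt_succ nums iN (eN - iN) b
            rw [show iN + (eN - iN) = eN by omega, hnum] at hsplit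
            have heq3 : (eN - 1) + 1 - iN = eN - iN := by omega
            rw [heq3]
            rcases pvBit01 nums[eN] b with h0 | h0
            · rw [if_neg (by rw [h0]; norm_num)] at hsplit
              rw [heq2] at hcb
              rw [hsplit, Nat.add_zero] at hcb
              omega
            · rw [if_pos h0] at hsplit
              rw [heq2, hsplit] at hcb
              push_cast at hcb ⊢
              omega)
          (by omega) (by push_cast at hfu ⊢; omega)
        exact hrec


-- B as a fold of its step function
def stepB (nums : List Int) (st : List Int × List Int × Int) (i : Int) : List Int × List Int × Int :=
  let cnt1 := (PySem.List.pyRange 0 32 1).foldl (fun c b =>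
      PySem.List.pySetD c b (PySem.List.pyGetD c b 0 +
        PySem.Int.band (PySem.List.pyGetD nums i 0 >>> b.toNat) 1)) st.1
  let s2 := pvShrink nums i (st.2.2 - i).toNat (cnt1, st.2.2)
  (s2.1, PySem.List.pySetD st.2.1 i (s2.2 - i + 1), s2.2)

lemma B_unfold (nums : List Int) : smallestSubarrays_alt nums =
    ((PySem.List.pyRange ((nums.length : Int) - 1) (-1) (-1)).foldl (stepB nums)
      (List.replicate 32 0, List.replicate nums.length 0, (nums.length : Int) - 1)).2.1 := by
  simp only [smallestSubarrays_alt, PySem.List.len_eq, PySem.List.pyRepeat_singleton,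
    Int.toNat_natCast]
  rfl

-- B's step at a concrete in-range index, against the invariant
lemma stepB_spec (nums : List Int) (iN eN : Nat) (hi : iN < nums.length) (he : eN < nums.length)
    (hie : iN ≤ eN) (cnt ans : List Int) (hcl : cnt.length = 32) (_hal : ans.length = nums.length)
    (hcnt : ∀ b : Nat, b < 32 → cnt.getD b 0 = (pvCnt nums (iN + 1) (eN - iN) b : Int))
    (hub : pvEnd nums iN ≤ (eN : Int)) :
    ((stepB nums (cnt, ans, ((eN : Nat) : Int)) ((iN : Nat) : Int)).1.length = 32 ∧
     (∀ b : Nat, b < 32 → (stepB nums (cnt, ans, ((eN : Nat) : Int)) ((iN : Nat) : Int)).1.getD b 0 =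
        (pvCnt nums iN ((pvEnd nums iN).toNat + 1 - iN) b : Int)) ∧
     (stepB nums (cnt, ans, ((eN : Nat) : Int)) ((iN : Nat) : Int)).2.1 =
        ans.set iN (pvEnd nums iN - ((iN : Nat) : Int) + 1) ∧
     (stepB nums (cnt, ans, ((eN : Nat) : Int)) ((iN : Nat) : Int)).2.2 = pvEnd nums iN) := by
  have hiN := le_pvEnd nums iN
  have hnum : nums.getD iN 0 = nums[iN] := List.getD_eq_getElem _ _ hi
  have hbit : ∀ (x : Int) (b : Nat), PySem.Int.band (x >>> b) 1 = pvBit x b := fun _ _ => rfl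
  have hadd := setFold (fun b v => v + pvBit nums[iN] b) 32 0 cnt hcl (by omega)
  simp only [Nat.zero_add] at hadd
  have hent : ∀ b : Nat, b < 32 →
      ((List.range' 0 32).foldl (fun cc b => cc.set b (cc.getD b 0 + pvBit nums[iN] b)) cnt).getD b 0 =
      (pvCnt nums iN (eN + 1 - iN) b : Int) := by
    intro b hb
    rw [hadd.2 b, if_pos (by omega), hcnt b hb]
    have hsplit := pvCnt_cons nums iN (eN - iN) b
    rw [hnum] at hsplit
    rw [show eN + 1 - iN = (eN - iN) + 1 by omega, hsplit]
    rcases pvBit01 nums[iN] b with h0 | h0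
    · rw [if_neg (by rw [h0]; norm_num)] at hsplit ⊢
      rw [h0]
      push_cast
      omega
    · rw [if_pos h0] at hsplit ⊢
      rw [h0]
      push_cast
      omega
  obtain ⟨s2, s1len, s1ent⟩ := shrink_spec nums (eN - iN) eN iN
    ((List.range' 0 32).foldl (fun cc b => cc.set b (cc.getD b 0 + pvBit nums[iN] b)) cnt)
    hi he hie hadd.1 hent hub (by omega)
  simp only [stepB, pyRange32, List.foldl_map, Int.toNat_natCast,
    PySem.List.pyGetD_natCast, PySem.List.pySetD_natCast, hnum, hbit,
    show ((eN : Nat) : Int) - ((iN : Nat) : Int) = (((eN - iN : Nat) : Nat) : Int) by omega]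
  exact ⟨s1len, fun b hb => s1ent b hb, by rw [s2], s2⟩

lemma B_outer (nums : List Int) : ∀ (m k : Nat), k + m = nums.length →
    ∀ (cnt ans : List Int) (eN : Nat),
    cnt.length = 32 → ans.length = nums.length → eN < nums.length →
    nums.length - k ≤ eN + 1 →
    (∀ b : Nat, b < 32 → cnt.getD b 0 =
      (pvCnt nums (nums.length - k) (eN + 1 - (nums.length - k)) b : Int)) →
    ((k = 0 ∧ eN = nums.length - 1) ∨ (0 < k ∧ ((eN : Nat) : Int) = pvEnd nums (nums.length - k))) →
    (∀ j : Nat, nums.length - k ≤ j → j < nums.length →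
      ans.getD j 0 = pvEnd nums j - (j : Int) + 1) →
    (((List.range' k m).foldl (fun st (t : Nat) => stepB nums st ((nums.length : Int) - 1 - (t : Int)))
        (cnt, ans, ((eN : Nat) : Int))).2.1.length = nums.length ∧
     ∀ j : Nat, j < nums.length →
      ((List.range' k m).foldl (fun st (t : Nat) => stepB nums st ((nums.length : Int) - 1 - (t : Int)))
        (cnt, ans, ((eN : Nat) : Int))).2.1.getD j 0 = pvEnd nums j - (j : Int) + 1) := by
  intro m
  induction m with
  | zero =>
    intro k hk cnt ans eN hcl hal heN hke hcnt hdisj hans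
    simp only [List.range'_zero, List.foldl_nil]
    exact ⟨hal, fun j hj => hans j (by omega) hj⟩
  | succ m ih =>
    intro k hk cnt ans eN hcl hal heN hke hcnt hdisj hans
    rw [List.range'_succ]
    simp only [List.foldl_cons]
    have hkn : k < nums.length := by omega
    set iN : Nat := nums.length - 1 - k with hiN
    have hi : iN < nums.length := by omega
    have hik1 : nums.length - k = iN + 1 := by omega
    have hcast : (nums.length : Int) - 1 - (k : Int) = ((iN : Nat) : Int) := by
      rw [hiN]; omega
    rw [hcast]
    have hie : iN ≤ eN := by omega
    have hub : pvEnd nums iN ≤ (eN : Int) := by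
      rcases hdisj with ⟨hk0, he0⟩ | ⟨hkpos, heq⟩
      · have := pvEnd_lt_length nums hi
        omega
      · rw [hik1] at heq
        have := pvEnd_mono nums iN
        omega
    have hcnt' : ∀ b : Nat, b < 32 → cnt.getD b 0 = (pvCnt nums (iN + 1) (eN - iN) b : Int) := by
      intro b hb
      rw [hcnt b hb, hik1, show eN + 1 - (iN + 1) = eN - iN by omega]
    obtain ⟨t1, t2, t3, t4⟩ := stepB_spec nums iN eN hi heN hie cnt ans hcl hal hcnt' hub
    have hpe0 : (0 : Int) ≤ pvEnd nums iN :=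
      le_trans (Int.natCast_nonneg iN) (le_pvEnd nums iN)
    set eS : Nat := (pvEnd nums iN).toNat with heS
    have h22 : (stepB nums (cnt, ans, ((eN : Nat) : Int)) ((iN : Nat) : Int)).2.2 =
        ((eS : Nat) : Int) := by
      rw [t4, heS, Int.toNat_of_nonneg hpe0]
    have hsplit : stepB nums (cnt, ans, ((eN : Nat) : Int)) ((iN : Nat) : Int) =
        ((stepB nums (cnt, ans, ((eN : Nat) : Int)) ((iN : Nat) : Int)).1,
         (stepB nums (cnt, ans, ((eN : Nat) : Int)) ((iN : Nat) : Int)).2.1,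
         ((eS : Nat) : Int)) := by
      rw [← h22]
    rw [hsplit]
    have heSlt : eS < nums.length := by
      have := pvEnd_lt_length nums hi
      omega
    have heSge : iN ≤ eS := by
      have := le_pvEnd nums iN
      omega
    exact ih (k + 1) (by omega) _ _ eS t1
      (by rw [t3]; simpa using hal)
      heSlt
      (by omega)
      (fun b hb => by
        rw [t2 b hb, show nums.length - (k + 1) = iN by omega, heS])
      (Or.inr ⟨by omega, by
        rw [show nums.length - (k + 1) = iN by omega, heS, Int.toNat_of_nonneg hpe0]⟩)
      (fun j hj1 hj2 => by
        rw [t3, getD_set_ite _ _ _ _ (by omega)]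
        by_cases hji : j = iN
        · rw [if_pos hji, hji]
        · rw [if_neg hji]
          exact hans j (by omega) hj2)

lemma B_eq_spec (nums : List Int) : smallestSubarrays_alt nums = pvSpecL nums := by
  rcases Nat.eq_zero_or_pos nums.length with hn | hn
  · rw [List.length_eq_zero_iff] at hn
    subst hn
    rfl
  · rw [B_unfold]
    have hrange : PySem.List.pyRange ((nums.length : Int) - 1) (-1) (-1) =
        (List.range' 0 nums.length).map (fun t : Nat => (nums.length : Int) - 1 - (t : Int)) := by
      rw [PySem.List.pyRange_neg_one, ← List.range_eq_range',
        show ((nums.length : Int) - 1 - (-1)) = ((nums.length : Nat) : Int) by ring,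
        Int.toNat_natCast]
    rw [hrange, List.foldl_map]
    rw [show ((List.replicate 32 (0 : Int)), (List.replicate nums.length (0 : Int)),
        ((nums.length : Int) - 1)) = ((List.replicate 32 (0 : Int)),
        (List.replicate nums.length (0 : Int)), (((nums.length - 1 : Nat) : Nat) : Int)) from by
      rw [show ((nums.length : Int) - 1) = (((nums.length - 1 : Nat) : Nat) : Int) by omega]]
    obtain ⟨hl, he⟩ := B_outer nums nums.length 0 (by omega)
      (List.replicate 32 0) (List.replicate nums.length 0) (nums.length - 1)
      (by simp) (by simp) (by omega) (by omega)
      (fun b hb => by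
        rw [List.getD_replicate _ hb, Nat.sub_zero,
          show nums.length - 1 + 1 - nums.length = 0 by omega, pvCnt_zero]
        norm_num)
      (Or.inl ⟨rfl, rfl⟩)
      (fun j hj1 hj2 => by omega)
    apply List.ext_getElem
    · rw [hl]
      simp [pvSpecL]
    · intro j h1 h2
      have hj : j < nums.length := by
        simpa [pvSpecL] using h2
      rw [← List.getD_eq_getElem _ 0 h1, he j hj]
      simp [pvSpecL]

-- ===== VERDICT (by name: the statement is the Claim_ definition above) =====
theorem smallestSubarrays_spec : Claim_equal_smallestSubarrays := by
  intro nums _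
  unfold Spec_smallestSubarrays
  rw [A_eq_spec, B_eq_spec]
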